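-- pv_equiv track=rewrite | github.com/trbouma/openetr | openetr/helpers.py | validate_lei
-- ===== SOURCE A (Python) =====
-- def _lei_char_to_int(char: str) -> str:
--     if char.isdigit():
--         return char
--     return str(ord(char) - 55)
--
-- def _prepare_lei_for_mod97(value: str) -> str:
--     return "".join(_lei_char_to_int(char) for char in value)
--
-- def _lei_mod97(value: str) -> int:
--     remainder = 0
--     for char in value:
--         remainder = (remainder * 10 + int(char)) % 97
--     return remainder
--
-- def validate_lei(value: str) -> bool:
--     lei_value = value.strip().upper()
--     if len(lei_value) != 20:
--         return False
--     if not all(char.isdigit() or char.isalpha() for char in lei_value):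
--         return False
--     if not lei_value[-2:].isdigit():
--         return False
--     return _lei_mod97(_prepare_lei_for_mod97(lei_value)) == 1
-- ===== SOURCE B (Python) =====
-- def validate_lei(value: str) -> bool:
--     lei_value = value.strip().upper()
--     if len(lei_value) == 20 and lei_value.isalnum() and lei_value[-2:].isdigit():
--         num = 0
--         for char in lei_value:
--             if char.isdigit():
--                 num = num * 10 + (ord(char) - 48)
--             else:
--                 num = num * 100 + (ord(char) - 55)
--         return num % 97 == 1
--     return False
-- ===== Notes on version B (the rewrite author's own statement) =====
-- stated objective: simpler
-- what changed: B drops the expand-to-digit-string + per-char int() + incremental mod-97 pipeline (three helpers) and instead accumulates one big integer directly from character codes (x10 for a digit, x100+value for a letter) with a single final mod 97; the guards collapse into one isalnum conjunction.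
import Mathlib
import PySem

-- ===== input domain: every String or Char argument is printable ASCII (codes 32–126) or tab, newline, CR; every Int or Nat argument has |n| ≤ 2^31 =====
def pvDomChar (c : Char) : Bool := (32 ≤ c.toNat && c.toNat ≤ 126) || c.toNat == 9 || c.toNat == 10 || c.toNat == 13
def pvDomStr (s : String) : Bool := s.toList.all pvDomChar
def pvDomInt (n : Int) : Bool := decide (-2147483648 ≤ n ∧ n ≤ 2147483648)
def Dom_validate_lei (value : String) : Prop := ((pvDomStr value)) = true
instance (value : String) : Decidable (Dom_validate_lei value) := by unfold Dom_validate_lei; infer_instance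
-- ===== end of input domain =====

-- B replaces A's expand-to-digit-string / int(char) / running-mod-97 pipeline by one direct
-- big-integer accumulation over the characters with a single final mod 97 (simpler: one pass, no strings built).

-- ===== PORT A =====
-- helper _lei_char_to_int (the piece of the expanded string contributed by one character)
def leiCharToInt (c : Char) : List Char :=
  if PySem.Chars.isdigit c then [c]
  else PySem.Int.toChars ((c.toNat : Int) - 55)

-- helper _prepare_lei_for_mod97 ("".join(_lei_char_to_int(char) for char in value))
def prepareLeiForMod97 (cs : List Char) : List Char :=
  PySem.Chars.join [] (cs.map leiCharToInt)

-- helper _lei_mod97; int(char) is ported as (ofChars? [c]).getD 0 — on every string A feeds this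
-- helper (the expansion of an all-digits/letters LEI) each char is an ASCII digit, so int() never
-- raises there and the default is never taken
def leiMod97 (cs : List Char) : Int :=
  cs.foldl (fun r c => PySem.Int.mod (r * 10 + (PySem.Int.ofChars? [c]).getD 0) 97) 0

def validate_lei (value : String) : Bool :=
  let lei := PySem.Chars.upper (PySem.Chars.strip value.toList)
  if !(lei.length == 20) then false
  else if !(lei.all (fun c => PySem.Chars.isdigit c || PySem.Chars.isalpha c)) then false
  else if !(PySem.Chars.strIsdigit (PySem.Chars.slice lei (some (-2)) none)) then false
  else leiMod97 (prepareLeiForMod97 lei) == 1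

-- ===== PORT B =====
-- B's accumulator loop: num = num*10 + (ord-48) for a digit, num*100 + (ord-55) otherwise
def leiNum (cs : List Char) : Int :=
  cs.foldl (fun n c =>
    if PySem.Chars.isdigit c then n * 10 + ((c.toNat : Int) - 48)
    else n * 100 + ((c.toNat : Int) - 55)) 0

def validate_lei_alt (value : String) : Bool :=
  let lei := PySem.Chars.upper (PySem.Chars.strip value.toList)
  if lei.length == 20 && PySem.Chars.strIsalnum lei
      && PySem.Chars.strIsdigit (PySem.Chars.slice lei (some (-2)) none) then
    PySem.Int.mod (leiNum lei) 97 == 1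
  else false

-- ===== PRECONDITION & SPEC =====
def Spec_validate_lei (value : String) (out : Bool) : Prop := out = validate_lei_alt value
instance (value : String) (out : Bool) : Decidable (Spec_validate_lei value out) := by unfold Spec_validate_lei; infer_instance

-- ===== CLAIM (what is proved, stated in full; the proofs are below) =====
def Claim_equal_validate_lei : Prop := ∀ (value : String), Dom_validate_lei value → Spec_validate_lei value (validate_lei value)

-- ===== LEMMAS AND PROOFS =====

-- int(d) for a single ASCII digit character, as a table over the 128 ASCII codes
theorem ofChars_digit_table : ∀ k : Nat, k < 128 → 48 ≤ k → k ≤ 57 →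
    PySem.Int.ofChars? [Char.ofNat k] = some ((k : Int) - 48) := by decide

-- str(v) for a two-digit number
theorem toDigits_two_digit : ∀ v : Nat, v < 100 → 10 ≤ v →
    Nat.toDigits 10 v = [Char.ofNat (48 + v / 10), Char.ofNat (48 + v % 10)] := by decide

theorem isdigit_toNat_bounds (c : Char) (h : PySem.Chars.isdigit c = true) :
    48 ≤ c.toNat ∧ c.toNat ≤ 57 := by
  simp only [PySem.Chars.isdigit, Bool.and_eq_true, decide_eq_true_eq] at h
  exact ⟨h.1, h.2⟩

theorem isalpha_toNat_bounds (c : Char) (h : PySem.Chars.isalpha c = true) :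
    (65 ≤ c.toNat ∧ c.toNat ≤ 90) ∨ (97 ≤ c.toNat ∧ c.toNat ≤ 122) := by
  simp only [PySem.Chars.isalpha, PySem.Chars.isupper, PySem.Chars.islower,
    Bool.or_eq_true, Bool.and_eq_true, decide_eq_true_eq] at h
  rcases h with ⟨h1, h2⟩ | ⟨h1, h2⟩
  · exact Or.inl ⟨h1, h2⟩
  · exact Or.inr ⟨h1, h2⟩

theorem ofChars_digit (c : Char) (h : PySem.Chars.isdigit c = true) :
    PySem.Int.ofChars? [c] = some ((c.toNat : Int) - 48) := by
  obtain ⟨h1, h2⟩ := isdigit_toNat_bounds c h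
  have := ofChars_digit_table c.toNat (by omega) h1 h2
  rwa [Char.ofNat_toNat] at this

theorem join_nil_cons (a : List Char) (xs : List (List Char)) :
    PySem.Chars.join [] (a :: xs) = a ++ PySem.Chars.join [] xs := by
  cases xs with
  | nil => simp [PySem.Chars.join, List.intercalate]
  | cons b bs => simp [PySem.Chars.join_cons_cons]

-- the A-steps contributed by one digit character, against the un-reduced accumulator
theorem stepA_digit (c : Char) (h : PySem.Chars.isdigit c = true) (n : Int) :
    PySem.Int.mod (n % 97 * 10 + (PySem.Int.ofChars? [c]).getD 0) 97
      = (n * 10 + ((c.toNat : Int) - 48)) % 97 := by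
  rw [ofChars_digit c h]
  simp only [Option.getD_some]
  simp [pysem]
  omega

-- the two A-steps contributed by one letter, against the un-reduced accumulator
theorem stepA_letter (c : Char) (h : PySem.Chars.isalpha c = true) (n : Int) :
    List.foldl (fun r c => PySem.Int.mod (r * 10 + (PySem.Int.ofChars? [c]).getD 0) 97)
        (n % 97) (PySem.Int.toChars ((c.toNat : Int) - 55))
      = (n * 100 + ((c.toNat : Int) - 55)) % 97 := by
  have hb := isalpha_toNat_bounds c h
  set k := c.toNat with hk
  have hpos : ¬ ((k : Int) - 55 < 0) := by omega
  have htn : ((k : Int) - 55).toNat = k - 55 := by omega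
  rw [PySem.Int.toChars, if_neg hpos, htn,
    toDigits_two_digit (k - 55) (by omega) (by omega)]
  simp only [List.foldl]
  rw [ofChars_digit_table (48 + (k - 55) / 10) (by omega) (by omega) (by omega),
    ofChars_digit_table (48 + (k - 55) % 10) (by omega) (by omega)
      (by have := Nat.mod_lt (k - 55) (show 0 < 10 by omega); omega)]
  simp only [Option.getD_some]
  simp [pysem]
  omega

-- the loop invariant: A's running remainder over the expanded string is B's big accumulator mod 97
theorem fold_equiv (l : List Char)
    (h : ∀ c ∈ l, (PySem.Chars.isdigit c || PySem.Chars.isalpha c) = true) (n : Int) :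
    List.foldl (fun r c => PySem.Int.mod (r * 10 + (PySem.Int.ofChars? [c]).getD 0) 97)
        (n % 97) (PySem.Chars.join [] (l.map leiCharToInt))
      = (List.foldl (fun n c =>
          if PySem.Chars.isdigit c then n * 10 + ((c.toNat : Int) - 48)
          else n * 100 + ((c.toNat : Int) - 55)) n l) % 97 := by
  induction l generalizing n with
  | nil => simp [PySem.Chars.join, List.intercalate]
  | cons c l ih =>
    rw [List.map_cons, join_nil_cons, List.foldl_append, List.foldl_cons]
    have hc := h c (List.mem_cons_self ..)
    have hl : ∀ c ∈ l, (PySem.Chars.isdigit c || PySem.Chars.isalpha c) = true :=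
      fun c hc => h c (List.mem_cons_of_mem _ hc)
    by_cases hd : PySem.Chars.isdigit c = true
    · rw [leiCharToInt, if_pos hd, List.foldl_cons, List.foldl_nil, stepA_digit c hd n, if_pos hd]
      exact ih hl _
    · have ha : PySem.Chars.isalpha c = true := by
        rcases Bool.or_eq_true_iff.mp hc with h' | h'
        · exact absurd h' hd
        · exact h'
      rw [leiCharToInt, if_neg hd, stepA_letter c ha n, if_neg hd]
      exact ih hl _

-- the checksum part: A's helper chain equals B's single mod
theorem checksum_equiv (l : List Char)
    (h : l.all (fun c => PySem.Chars.isdigit c || PySem.Chars.isalpha c) = true) :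
    leiMod97 (prepareLeiForMod97 l) = PySem.Int.mod (leiNum l) 97 := by
  have h' : ∀ c ∈ l, (PySem.Chars.isdigit c || PySem.Chars.isalpha c) = true :=
    fun c hc => List.all_eq_true.mp h c hc
  rw [leiMod97, prepareLeiForMod97, leiNum]
  have hf := fold_equiv l h' 0
  norm_num at hf
  simp only [Nat.ofNat_pos, PySem.Int.mod_eq_emod_of_pos]
  exact hf

-- the guard part: with length 20, A's all-digit-or-alpha equals B's isalnum
theorem guard_equiv (l : List Char) (hlen : l.length = 20) :
    l.all (fun c => PySem.Chars.isdigit c || PySem.Chars.isalpha c)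
      = PySem.Chars.strIsalnum l := by
  have hne : l.isEmpty = false := by cases l <;> simp_all
  have hfun : (fun c => PySem.Chars.isdigit c || PySem.Chars.isalpha c) = PySem.Chars.isalnum :=
    funext fun c => by simp [PySem.Chars.isalnum, Bool.or_comm]
  simp [PySem.Chars.strIsalnum, hne, hfun]

-- ===== VERDICT (by name: the statement is the Claim_ definition above) =====
theorem validate_lei_spec : Claim_equal_validate_lei := by
  intro value _
  unfold Spec_validate_lei
  simp only [validate_lei, validate_lei_alt]
  generalize PySem.Chars.upper (PySem.Chars.strip value.toList) = lei
  by_cases h1 : lei.length = 20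
  · rw [← guard_equiv lei h1]
    by_cases h2 : lei.all (fun c => PySem.Chars.isdigit c || PySem.Chars.isalpha c) = true
    · by_cases h3 : PySem.Chars.strIsdigit (PySem.List.slice lei (some (-2)) none) = true
      · simp only [Nat.ofNat_pos, PySem.Int.mod_eq_emod_of_pos] at *
        simp [h1, h2, h3, checksum_equiv lei h2]
      · simp [h1, h2, h3]
    · simp [h1, h2]
  · simp [h1]
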